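-- pv_equiv track=rewrite | github.com/rowanterra/terrahedral | src/terrahedral/parsers/mmcif_parser.py | _parse_loop
-- ===== SOURCE A (Python) =====
-- def _parse_loop(lines: list[str], category: str) -> list[dict]:
--     """
--     Parse a loop_ block for the given category (e.g. '_struct_conn').
--
--     Returns a list of dicts, one per row, keyed by the attribute name
--     (the part after the dot).  For example, '_struct_conn.id' → key 'id'.
--
--     Handles:
--       - arbitrary column ordering
--       - quoted values (single-quote delimited)
--       - '?' and '.' as-is (caller decides meaning)
--     """
--     rows: list[dict] = []
--     columns: list[str] = []     # attribute names in column order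
--     in_headers = False
--     in_data = False
--     prefix = category + "."
--
--     i = 0
--     while i < len(lines):
--         stripped = lines[i].strip()
--
--         # Detect start of our loop_ block via its headers
--         if stripped.startswith(prefix):
--             if not in_headers:
--                 in_headers = True
--                 columns = []
--             attr = stripped[len(prefix):]
--             columns.append(attr)
--             i += 1
--             continue
--
--         # If we were collecting headers and hit a non-header line,
--         # switch to data mode
--         if in_headers and not stripped.startswith(prefix):
--             in_headers = False
--             in_data = True
--
--         if in_data:
--             # End of data: blank line, new loop_, new category, or '#'
--             if (
--                 not stripped
--                 or stripped.startswith("loop_")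
--                 or stripped.startswith("_")
--                 or stripped == "#"
--             ):
--                 break
--
--             # Tokenize the line, respecting single-quoted strings
--             tokens = _tokenize(stripped)
--
--             if len(tokens) >= len(columns):
--                 row = {}
--                 for ci, col in enumerate(columns):
--                     row[col] = tokens[ci]
--                 rows.append(row)
--
--         i += 1
--
--     return rows
--
-- def _tokenize(line: str) -> list[str]:
--     """
--     Split an mmCIF data line into tokens, handling single-quoted values.
--
--     Examples:
--         "metalc1 metalc A ASP 1 OD1"  →  ['metalc1', 'metalc', 'A', 'ASP', '1', 'OD1']
--         "disulf1 disulf 'HIS A' B CYS"  →  ['disulf1', 'disulf', 'HIS A', 'B', 'CYS']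
--     """
--     tokens = []
--     i = 0
--     n = len(line)
--     while i < n:
--         if line[i] in (' ', '\t'):
--             i += 1
--             continue
--         if line[i] == "'":
--             # Find closing quote (followed by space or end)
--             end = line.find("'", i + 1)
--             if end == -1:
--                 tokens.append(line[i + 1:])
--                 break
--             tokens.append(line[i + 1:end])
--             i = end + 1
--         elif line[i] == '"':
--             end = line.find('"', i + 1)
--             if end == -1:
--                 tokens.append(line[i + 1:])
--                 break
--             tokens.append(line[i + 1:end])
--             i = end + 1
--         else:
--             end = i
--             while end < n and line[end] not in (' ', '\t'):
--                 end += 1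
--             tokens.append(line[i:end])
--             i = end
--     return tokens
-- ===== SOURCE B (Python) =====
-- def _parse_loop(lines: list[str], category: str) -> list[dict]:
--     """Two-phase rewrite: find the header run, collect columns, then scan data
--     rows, restarting the block whenever a new header run for the category
--     appears (same behaviour as the fused state-machine original)."""
--     prefix = category + "."
--     ss = [l.strip() for l in lines]
--     rows: list[dict] = []
--     # Phase 0: find the first header line.
--     i = next((k for k, s in enumerate(ss) if s.startswith(prefix)), None)
--     while i is not None:
--         # Phase 1: collect the contiguous run of header lines.
--         j = i
--         while j < len(ss) and ss[j].startswith(prefix):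
--             j += 1
--         columns = [s[len(prefix):] for s in ss[i:j]]
--         i = None
--         # Phase 2: consume data lines until a terminator or a new header run.
--         while j < len(ss):
--             s = ss[j]
--             if s.startswith(prefix):
--                 i = j  # a fresh header run restarts the block
--                 break
--             if not s or s.startswith("loop_") or s.startswith("_") or s == "#":
--                 break
--             tokens = _tokenize(s)
--             if len(tokens) >= len(columns):
--                 rows.append(dict(zip(columns, tokens)))
--             j += 1
--     return rows
--
--
-- def _tokenize(line: str) -> list[str]:
--     tokens = []
--     i = 0
--     n = len(line)
--     while i < n:
--         if line[i] in (' ', '\t'):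
--             i += 1
--             continue
--         if line[i] == "'":
--             end = line.find("'", i + 1)
--             if end == -1:
--                 tokens.append(line[i + 1:])
--                 break
--             tokens.append(line[i + 1:end])
--             i = end + 1
--         elif line[i] == '"':
--             end = line.find('"', i + 1)
--             if end == -1:
--                 tokens.append(line[i + 1:])
--                 break
--             tokens.append(line[i + 1:end])
--             i = end + 1
--         else:
--             end = i
--             while end < n and line[end] not in (' ', '\t'):
--                 end += 1
--             tokens.append(line[i:end])
--             i = end
--     return tokens
-- ===== Notes on version B (the rewrite author's own statement) =====
-- stated objective: alternative
-- what changed: Replaces A's single fused while-loop driven by in_headers/in_data flags with an explicit phase decomposition: skip to the first header line, collect the contiguous header run into columns, then scan data lines (restarting the block on a fresh header run), keeping _tokenize unchanged.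
import Mathlib
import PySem

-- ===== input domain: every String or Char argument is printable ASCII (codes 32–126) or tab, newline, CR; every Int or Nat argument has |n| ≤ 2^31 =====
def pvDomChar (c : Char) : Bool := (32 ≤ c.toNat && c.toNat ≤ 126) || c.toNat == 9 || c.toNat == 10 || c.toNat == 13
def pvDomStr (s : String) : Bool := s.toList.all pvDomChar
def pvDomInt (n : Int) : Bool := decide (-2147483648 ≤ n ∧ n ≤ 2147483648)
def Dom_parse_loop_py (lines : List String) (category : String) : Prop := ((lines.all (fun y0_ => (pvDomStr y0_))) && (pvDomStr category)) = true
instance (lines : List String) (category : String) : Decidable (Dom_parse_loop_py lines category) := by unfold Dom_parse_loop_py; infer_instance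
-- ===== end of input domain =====

-- B re-decomposes A's fused flag-driven while-loop into explicit phases (skip / header run / data scan
-- with restart); same return value on every input (objective: alternative decomposition, same cost).

-- ===== SHARED HELPERS (both Python sources contain the identical `_tokenize` and the identical
-- terminator test; `attrOf` is `stripped[len(prefix):]`) =====

-- _tokenize's while-loop over the string, as structural recursion on the char list.
-- `line.find(q, i+1)` / the unquoted-token scan are rendered with takeWhile/dropWhile on the
-- remaining chars, which is exactly the indices the Python computes (exact on all inputs).
def tokChars : List Char → List String
  | [] => []
  | c :: rest =>
    if c == ' ' || c == '\t' then tokChars rest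
    else if c == '\'' || c == '"' then
      -- token = line[i+1:end] where end = next occurrence of the same quote (or end of line)
      let tok := rest.takeWhile (fun d => d != c)
      match h : rest.dropWhile (fun d => d != c) with
      | [] => [String.mk tok]                    -- no closing quote: take the rest, break
      | _ :: rem => String.mk tok :: tokChars rem
    else
      -- unquoted token: scan to the next space/tab
      String.mk (c :: rest.takeWhile (fun d => !(d == ' ' || d == '\t'))) ::
        tokChars (rest.dropWhile (fun d => !(d == ' ' || d == '\t')))
termination_by cs => cs.length
decreasing_by
  · simp only [List.length_cons]; omega
  · have h2 := List.length_dropWhile_le (fun d => d != c) rest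
    rw [h] at h2
    simp only [List.length_cons] at h2 ⊢
    omega
  · have h2 := List.length_dropWhile_le (fun d => !(d == ' ' || d == '\t')) rest
    simp only [List.length_cons]
    omega

def tokenize (s : String) : List String := tokChars s.toList

-- "not stripped or stripped.startswith('loop_') or stripped.startswith('_') or stripped == '#'"
def isTerm (s : String) : Bool :=
  PySem.Str.len s == 0 || PySem.Str.startswith s "loop_" || PySem.Str.startswith s "_" || s == "#"

-- stripped[len(prefix):]  (slice with nonnegative start = drop, exact)
def attrOf (pre s : String) : String := String.mk (s.toList.drop pre.toList.length)

-- ===== PORT A =====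

-- row = {}; for ci, col in enumerate(columns): row[col] = tokens[ci]
-- (tokens[ci] is always in range here because the caller checked len(tokens) >= len(columns),
--  so pyGetD's default is never read)
def rowA (cols toks : List String) : List (String × String) :=
  ((PySem.List.enumerate cols).foldl
    (fun d (q : Int × String) => PySem.Dict.insert d q.2 (PySem.List.pyGetD toks q.1 ""))
    PySem.Dict.empty).items

-- the while-loop with state (rows, columns, in_headers, in_data), one step per line
def goA (pre : String) (ls : List String) (rows : List (List (String × String)))
    (cols : List String) (inH inD : Bool) : List (List (String × String)) :=
  match ls with
  | [] => rows
  | l :: t =>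
    let s := PySem.Str.strip l
    if PySem.Str.startswith s pre then
      goA pre t rows ((if inH then cols else []) ++ [attrOf pre s]) true inD
    else
      let inD' := inH || inD
      if inD' then
        if isTerm s then rows
        else
          let toks := tokenize s
          goA pre t (if cols.length ≤ toks.length then rows ++ [rowA cols toks] else rows)
            cols false inD'
      else goA pre t rows cols false inD'

def parse_loop_py (lines : List String) (category : String) : List (List (String × String)) :=
  goA (category ++ ".") lines [] [] false false

-- ===== PORT B =====

-- dict(zip(columns, tokens))
def rowB (cols toks : List String) : List (String × String) :=
  ((cols.zip toks).foldl (fun d (q : String × String) => PySem.Dict.insert d q.1 q.2)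
    PySem.Dict.empty).items

-- Source B's outer `while i is not None` loop with its two inner phase loops, rendered as mutual
-- tail recursion: goB = phase 1 (collect the header run), dataB = phase 2 (scan data lines,
-- restarting via goB on a fresh header line).
mutual
def goB (pre : String) (rows : List (List (String × String))) (s : String) (t : List String) :
    List (List (String × String)) :=
  let cols := attrOf pre s :: (t.takeWhile (fun h => PySem.Str.startswith h pre)).map (attrOf pre)
  dataB pre cols rows (t.dropWhile (fun h => PySem.Str.startswith h pre))
termination_by 2 * t.length + 1
decreasing_by
  have := List.length_dropWhile_le (fun h => PySem.Str.startswith h pre) t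
  omega

def dataB (pre : String) (cols : List String) (rows : List (List (String × String)))
    (ds : List String) : List (List (String × String)) :=
  match ds with
  | [] => rows
  | s :: t =>
    if PySem.Str.startswith s pre then goB pre rows s t
    else if isTerm s then rows
    else
      let toks := tokenize s
      dataB pre cols (if cols.length ≤ toks.length then rows ++ [rowB cols toks] else rows) t
termination_by 2 * ds.length
decreasing_by
  · simp only [List.length_cons]; omega
  · simp only [List.length_cons]; omega
end

def parse_loop_py_alt (lines : List String) (category : String) : List (List (String × String)) :=
  let pre := category ++ "."
  let ss := lines.map PySem.Str.strip
  match ss.dropWhile (fun s => !PySem.Str.startswith s pre) with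
  | [] => []
  | s :: t => goB pre [] s t

-- ===== PRECONDITION & SPEC =====
def Spec_parse_loop_py (lines : List String) (category : String) (out : List (List (String × String))) : Prop := out = parse_loop_py_alt lines category
instance (lines : List String) (category : String) (out : List (List (String × String))) : Decidable (Spec_parse_loop_py lines category out) := by unfold Spec_parse_loop_py; infer_instance

-- ===== CLAIM (what is proved, stated in full; the proofs are below) =====
def Claim_equal_parse_loop_py : Prop := ∀ (lines : List String) (category : String), Dom_parse_loop_py lines category → Spec_parse_loop_py lines category (parse_loop_py lines category)

-- ===== LEMMAS AND PROOFS =====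

-- unfolding equations for the (well-founded) mutual pair
theorem dataB_nil (pre : String) (cols : List String) (rows : List (List (String × String))) :
    dataB pre cols rows [] = rows := by rw [dataB.eq_def]

theorem dataB_cons (pre : String) (cols : List String) (rows : List (List (String × String)))
    (s : String) (t : List String) :
    dataB pre cols rows (s :: t) =
      (if PySem.Str.startswith s pre then goB pre rows s t
       else if isTerm s then rows
       else
         let toks := tokenize s
         dataB pre cols (if cols.length ≤ toks.length then rows ++ [rowB cols toks] else rows) t) := by
  rw [dataB.eq_def]

theorem goB_unfold (pre : String) (rows : List (List (String × String))) (s : String)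
    (t : List String) :
    goB pre rows s t =
      dataB pre
        (attrOf pre s :: (t.takeWhile (fun h => PySem.Str.startswith h pre)).map (attrOf pre))
        rows (t.dropWhile (fun h => PySem.Str.startswith h pre)) := by
  rw [goB.eq_def]

-- The two row builders agree whenever len(tokens) >= len(columns).
theorem row_fold_eq (toks : List String) : ∀ (cols : List String) (k : Nat)
    (d : PySem.Dict String String), cols.length + k ≤ toks.length →
    (PySem.List.enumerate cols (k : Int)).foldl
      (fun d (q : Int × String) => PySem.Dict.insert d q.2 (PySem.List.pyGetD toks q.1 "")) d
    = (cols.zip (toks.drop k)).foldl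
      (fun d (q : String × String) => PySem.Dict.insert d q.1 q.2) d := by
  intro cols
  induction cols with
  | nil => intro k d _; simp [PySem.List.enumerate]
  | cons c cs ih =>
    intro k d h
    have hk : k < toks.length := by simp at h; omega
    rw [PySem.List.enumerate_cons]
    have hdrop : toks.drop k = toks[k] :: toks.drop (k + 1) :=
      List.drop_eq_getElem_cons hk
    rw [hdrop]
    simp only [List.zip_cons_cons, List.foldl_cons]
    have hcast : ((k : Int) + 1) = ((k + 1 : Nat) : Int) := by push_cast; ring
    rw [PySem.List.pyGetD_natCast, hcast, ih (k + 1) _ (by simp at h ⊢; omega)]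
    congr 1
    simp [List.getD_eq_getElem?_getD, hk]

theorem rowA_eq_rowB (cols toks : List String) (h : cols.length ≤ toks.length) :
    rowA cols toks = rowB cols toks := by
  unfold rowA rowB
  have := row_fold_eq toks cols 0 PySem.Dict.empty (by omega)
  simpa using congrArg PySem.Dict.items this

-- A's header state (in_headers = true, any in_data) equals B's phase 1 + phase 2;
-- A's data state (in_headers = false, in_data = true) equals B's phase 2.
theorem goA_headers_data (pre : String) : ∀ (n : Nat) (ls : List String), ls.length ≤ n →
    (∀ rows cols inD,
      goA pre ls rows cols true inD =
        dataB pre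
          (cols ++ ((ls.map PySem.Str.strip).takeWhile
              (fun h => PySem.Str.startswith h pre)).map (attrOf pre))
          rows
          ((ls.map PySem.Str.strip).dropWhile (fun h => PySem.Str.startswith h pre)))
    ∧ (∀ rows cols,
      goA pre ls rows cols false true = dataB pre cols rows (ls.map PySem.Str.strip)) := by
  intro n
  induction n with
  | zero =>
    intro ls hls
    have : ls = [] := List.eq_nil_of_length_eq_zero (by omega)
    subst this
    exact ⟨fun rows cols inD => by simp [goA, dataB_nil],
           fun rows cols => by simp [goA, dataB_nil]⟩
  | succ m ih =>
    intro ls hls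
    match ls with
    | [] =>
      exact ⟨fun rows cols inD => by simp [goA, dataB_nil],
             fun rows cols => by simp [goA, dataB_nil]⟩
    | l :: t =>
      have ht : t.length ≤ m := by simp at hls; omega
      constructor
      · -- header state
        intro rows cols inD
        rw [goA]
        simp only [List.map_cons]
        by_cases hp : PySem.Str.startswith (PySem.Str.strip l) pre = true
        · rw [if_pos hp, (ih t ht).1, List.takeWhile_cons_of_pos (by simpa using hp),
            List.dropWhile_cons_of_pos (by simpa using hp)]
          simp
        · rw [if_neg hp, List.takeWhile_cons_of_neg (by simpa using hp),
            List.dropWhile_cons_of_neg (by simpa using hp)]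
          simp only [Bool.true_or, if_true, List.map_nil, List.append_nil]
          rw [dataB_cons, if_neg hp]
          by_cases hterm : isTerm (PySem.Str.strip l) = true
          · rw [if_pos hterm, if_pos hterm]
          · rw [if_neg hterm, if_neg hterm]
            simp only
            rw [(ih t ht).2]
            by_cases hlen : cols.length ≤ (tokenize (PySem.Str.strip l)).length
            · rw [if_pos hlen, if_pos hlen, rowA_eq_rowB _ _ hlen]
            · rw [if_neg hlen, if_neg hlen]
      · -- data state
        intro rows cols
        rw [goA]
        simp only [List.map_cons]
        by_cases hp : PySem.Str.startswith (PySem.Str.strip l) pre = true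
        · rw [if_pos hp, (ih t ht).1, dataB_cons, if_pos hp, goB_unfold]
          simp
        · rw [if_neg hp]
          simp only [Bool.false_or, if_true]
          rw [dataB_cons, if_neg hp]
          by_cases hterm : isTerm (PySem.Str.strip l) = true
          · rw [if_pos hterm, if_pos hterm]
          · rw [if_neg hterm, if_neg hterm]
            simp only
            rw [(ih t ht).2]
            by_cases hlen : cols.length ≤ (tokenize (PySem.Str.strip l)).length
            · rw [if_pos hlen, if_pos hlen, rowA_eq_rowB _ _ hlen]
            · rw [if_neg hlen, if_neg hlen]

-- A's skip state (both flags false) equals B's phase 0 (drop until the first header line).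
theorem goA_skip (pre : String) : ∀ (ls : List String) (rows : List (List (String × String)))
    (cols : List String),
    goA pre ls rows cols false false =
      (match (ls.map PySem.Str.strip).dropWhile
          (fun s => !PySem.Str.startswith s pre) with
       | [] => rows
       | s :: t => goB pre rows s t) := by
  intro ls
  induction ls with
  | nil => intro rows cols; simp [goA]
  | cons l t ih =>
    intro rows cols
    rw [goA]
    simp only [List.map_cons]
    by_cases hp : PySem.Str.startswith (PySem.Str.strip l) pre = true
    · rw [if_pos hp, List.dropWhile_cons_of_neg (by simpa using hp)]
      rw [(goA_headers_data pre t.length t le_rfl).1]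
      simp [goB_unfold]
    · rw [if_neg hp]
      simp only [Bool.or_self, Bool.false_eq_true, if_false]
      rw [ih rows cols, List.dropWhile_cons_of_pos (by simpa using hp)]

-- ===== VERDICT (by name: the statement is the Claim_ definition above) =====
theorem parse_loop_py_spec : Claim_equal_parse_loop_py := by
  intro lines category _
  unfold Spec_parse_loop_py parse_loop_py parse_loop_py_alt
  simp only []
  rw [goA_skip]
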